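-- pv_equiv track=rewrite | github.com/tsiorosjohn/advent_of_code | 2015/day_3/deliver_presents2.py | get_houses
-- ===== SOURCE A (Python) =====
-- def get_houses(ls):
--     """get houses that receive at least one present"""
--     x = 0
--     y = 0
--     xr = 0
--     yr = 0
--     grid_santa = [(0, 0)]
--     grid_robo_santa = [(0, 0)]
--     for count, house in enumerate(ls):
--         if count % 2 == 0:
--             if house == '>':
--                 x += 1
--             elif house == '<':
--                 x -= 1
--             elif house == '^':
--                 y += 1
--             elif house == 'v':
--                 y -= 1
--             grid_santa.append((x, y))
--
--         else:
--             if count % 2 == 1: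
--                 if house == '>':
--                     xr += 1
--                 elif house == '<':
--                     xr -= 1
--                 elif house == '^':
--                     yr += 1
--                 elif house == 'v':
--                     yr -= 1
--             grid_robo_santa.append((xr, yr))
--     grid_santa_set = set(grid_santa)
--     grid_robo_santa_set = set(grid_robo_santa)
--     full_grid = list(grid_santa_set) + list(grid_robo_santa_set)
--     return set(full_grid)
-- ===== SOURCE B (Python) =====
-- def visited(seq):
--     """set of positions reached by one agent walking seq from the origin"""
--     moves = {'>': (1, 0), '<': (-1, 0), '^': (0, 1), 'v': (0, -1)}
--     x = y = 0
--     seen = {(0, 0)}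
--     for c in seq:
--         dx, dy = moves.get(c, (0, 0))
--         x += dx
--         y += dy
--         seen.add((x, y))
--     return seen
--
--
-- def get_houses(ls):
--     """get houses that receive at least one present"""
--     return visited(ls[::2]) | visited(ls[1::2])
-- ===== Notes on version B (the rewrite author's own statement) =====
-- stated objective: simpler
-- what changed: A's single interleaved loop with a parity branch over enumerate(ls), keeping six state variables and deduplicating two position lists at the end, is replaced by one small helper walking a sequence and collecting its visited set, applied independently to the slices ls[::2] and ls[1::2] and unioned; the per-character if/elif chain becomes a moves-dict lookup.
import Mathlib
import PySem

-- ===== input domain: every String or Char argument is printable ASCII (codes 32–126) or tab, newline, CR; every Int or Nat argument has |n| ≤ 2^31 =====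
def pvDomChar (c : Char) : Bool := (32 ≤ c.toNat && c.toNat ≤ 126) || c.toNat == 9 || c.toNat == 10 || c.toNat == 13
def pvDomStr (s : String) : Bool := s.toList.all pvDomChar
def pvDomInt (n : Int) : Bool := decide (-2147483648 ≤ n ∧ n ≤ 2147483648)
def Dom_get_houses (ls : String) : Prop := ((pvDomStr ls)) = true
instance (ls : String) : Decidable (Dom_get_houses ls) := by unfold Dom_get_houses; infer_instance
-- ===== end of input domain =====

-- B replaces A's single interleaved parity-branching pass (two position lists deduplicated at
-- the end) by two independent walks over the slices ls[::2] and ls[1::2] whose visited sets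
-- are unioned (objective: simpler decomposition; same asymptotic cost).

-- ===== PORT A =====
-- the body of A's 'for count, house in enumerate(ls)' loop, named so the proofs can speak about it
def pvStepA (st : Int × Int × Int × Int × List (Int × Int) × List (Int × Int))
    (p : Int × Char) : Int × Int × Int × Int × List (Int × Int) × List (Int × Int) :=
  let (x, y, xr, yr, gs, gr) := st
  let (count, house) := p
  if PySem.Int.mod count 2 = 0 then
    let (x, y) :=
      if house = '>' then (x + 1, y)
      else if house = '<' then (x - 1, y)
      else if house = '^' then (x, y + 1)
      else if house = 'v' then (x, y - 1)
      else (x, y)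
    (x, y, xr, yr, gs ++ [(x, y)], gr)
  else
    let (xr, yr) :=
      if PySem.Int.mod count 2 = 1 then
        (if house = '>' then (xr + 1, yr)
         else if house = '<' then (xr - 1, yr)
         else if house = '^' then (xr, yr + 1)
         else if house = 'v' then (xr, yr - 1)
         else (xr, yr))
      else (xr, yr)
    (x, y, xr, yr, gs, gr ++ [(xr, yr)])

def get_houses (ls : String) : List (Int × Int) :=
  let init : Int × Int × Int × Int × List (Int × Int) × List (Int × Int) :=
    (0, 0, 0, 0, [((0 : Int), (0 : Int))], [((0 : Int), (0 : Int))])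
  let st := (PySem.List.enumerate ls.toList 0).foldl pvStepA init
  let (_, _, _, _, gs, gr) := st
  let grid_santa_set : PySem.Set (Int × Int) := PySem.Set.ofList gs
  let grid_robo_santa_set : PySem.Set (Int × Int) := PySem.Set.ofList gr
  PySem.Set.ofList (grid_santa_set ++ grid_robo_santa_set)

-- ===== PORT B =====
-- helper 'visited' of Source B: one agent's walk from the origin, visited positions as a set
def pvVisited (seq : String) : PySem.Set (Int × Int) :=
  let moves : PySem.Dict Char (Int × Int) :=
    PySem.Dict.ofList [('>', (1, 0)), ('<', (-1, 0)), ('^', (0, 1)), ('v', (0, -1))]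
  let st := seq.toList.foldl
    (fun (st : Int × Int × PySem.Set (Int × Int)) c =>
      let (x, y, seen) := st
      let (dx, dy) := moves.getD c (0, 0)
      (x + dx, y + dy, PySem.Set.add seen (x + dx, y + dy)))
    (0, 0, PySem.Set.ofList [((0 : Int), (0 : Int))])
  st.2.2

def get_houses_alt (ls : String) : List (Int × Int) :=
  -- ls[::2] and ls[1::2] never raise (step ≠ 0), so the '.getD ""' padding is unreachable
  PySem.Set.union (pvVisited ((PySem.Str.slice? ls none none 2).getD ""))
                  (pvVisited ((PySem.Str.slice? ls (some 1) none 2).getD ""))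

-- ===== PRECONDITION & SPEC =====
def Spec_get_houses (ls : String) (out : List (Int × Int)) : Prop := out = get_houses_alt ls
instance (ls : String) (out : List (Int × Int)) : Decidable (Spec_get_houses ls out) := by unfold Spec_get_houses; infer_instance

-- ===== CLAIM (what is proved, stated in full; the proofs are below) =====
def Claim_equal_get_houses : Prop := ∀ (ls : String), Dom_get_houses ls → Spec_get_houses ls (get_houses ls)

-- ===== LEMMAS AND PROOFS =====

/-- the per-character displacement both programs apply -/
def pvDelta (c : Char) : Int × Int :=
  if c = '>' then (1, 0) else if c = '<' then (-1, 0)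
  else if c = '^' then (0, 1) else if c = 'v' then (0, -1) else (0, 0)

/-- positions visited after the start point, in order -/
def pvPath : List Char → Int → Int → List (Int × Int)
  | [], _, _ => []
  | c :: t, x, y =>
    (x + (pvDelta c).1, y + (pvDelta c).2) :: pvPath t (x + (pvDelta c).1) (y + (pvDelta c).2)

/-- final position of a walk (only used to state the B-loop invariant) -/
def pvEnd : List Char → Int → Int → Int × Int
  | [], x, y => (x, y)
  | c :: t, x, y => pvEnd t (x + (pvDelta c).1) (y + (pvDelta c).2)

/-- every other element, starting with the first (= xs[::2]) -/
def pvEvens {α : Type} : List α → List α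
  | [] => []
  | [a] => [a]
  | a :: _ :: t => a :: pvEvens t

lemma pv_fm_even {α : Type} (xs : List α)
    (f : Nat → Option α) (hf : ∀ k, f k = xs[2 * k]?) :
    List.filterMap f (List.range ((xs.length + 1) / 2)) = pvEvens xs := by
  induction xs using pvEvens.induct generalizing f with
  | case1 => simp [pvEvens]
  | case2 a =>
      have h1 : (([a] : List α).length + 1) / 2 = 1 := by simp
      rw [h1, List.range_succ]
      simp [hf, pvEvens]
  | case3 a b t ih =>
      have hlen : ((a :: b :: t).length + 1) / 2 = (t.length + 1) / 2 + 1 := by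
        simp [List.length_cons]; omega
      rw [hlen, List.range_succ_eq_map, List.filterMap_cons, List.filterMap_map, hf]
      simp only [Nat.mul_zero, List.getElem?_cons_zero]
      have h2 : List.filterMap (fun x => f (x + 1)) (List.range ((t.length + 1) / 2)) = pvEvens t := by
        apply ih
        intro k
        rw [hf]
        have : 2 * (k + 1) = 2 * k + 1 + 1 := by omega
        rw [this]
        simp
      simpa [pvEvens] using h2

lemma pv_slice_even (xs : List Char) :
    PySem.List.slice? xs none none 2 = some (pvEvens xs) := by
  simp only [PySem.List.slice?, PySem.List.sliceIndices]
  norm_num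
  have hcnt : (if 0 < xs.length then (((xs.length : Int) + 2 - 1) / 2).toNat else 0)
      = (xs.length + 1) / 2 := by
    split_ifs with h <;> omega
  rw [hcnt]
  apply pv_fm_even
  intro k
  congr 1

lemma pv_slice_odd (xs : List Char) :
    PySem.List.slice? xs (some 1) none 2 = some (pvEvens xs.tail) := by
  simp only [PySem.List.slice?, PySem.List.sliceIndices]
  norm_num
  cases xs with
  | nil => simp [pvEvens]
  | cons a t =>
      have hmin : min 1 ((a :: t).length : Int) = 1 := by simp
      rw [hmin]
      have hcnt : (if 1 < (a :: t).length then ((((a :: t).length : Int) - 1 + 2 - 1) / 2).toNat else 0)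
          = (t.length + 1) / 2 := by
        simp only [List.length_cons]
        split_ifs with h <;> omega
      rw [hcnt]
      have := pv_fm_even t (fun x => (a :: t)[(1 + 2 * (x : Int)).toNat]?) (by
        intro k
        have h1 : ((1 : Int) + 2 * (k : Int)).toNat = 2 * k + 1 := by omega
        simp only []
        rw [h1]
        simp)
      simpa using this

lemma pv_getD_moves (c : Char) :
    (PySem.Dict.ofList [('>', ((1:Int), (0:Int))), ('<', (-1, 0)), ('^', (0, 1)), ('v', (0, -1))]).getD c (0, 0)
      = pvDelta c := by
  have hd : PySem.Dict.ofList [('>', ((1:Int), (0:Int))), ('<', (-1, 0)), ('^', (0, 1)), ('v', (0, -1))]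
      = PySem.Dict.mk [('>', ((1:Int), (0:Int))), ('<', (-1, 0)), ('^', (0, 1)), ('v', (0, -1))] := by rfl
  rw [hd]
  by_cases h1 : c = '>'
  · subst h1; rfl
  by_cases h2 : c = '<'
  · subst h2; rfl
  by_cases h3 : c = '^'
  · subst h3; rfl
  by_cases h4 : c = 'v'
  · subst h4; rfl
  have b1 : ('>' == c) = false := by simp [Ne.symm h1]
  have b2 : ('<' == c) = false := by simp [Ne.symm h2]
  have b3 : ('^' == c) = false := by simp [Ne.symm h3]
  have b4 : ('v' == c) = false := by simp [Ne.symm h4]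
  simp [PySem.Dict.getD, PySem.Dict.get?, pvDelta, h1, h2, h3, h4, b1, b2, b3, b4, List.find?]

lemma pv_foldB (seq : List Char) : ∀ (x y : Int) (s : PySem.Set (Int × Int)),
    seq.foldl
      (fun (st : Int × Int × PySem.Set (Int × Int)) c =>
        let (x, y, seen) := st
        let (dx, dy) := (PySem.Dict.ofList [('>', ((1:Int), (0:Int))), ('<', (-1, 0)), ('^', (0, 1)), ('v', (0, -1))]).getD c (0, 0)
        (x + dx, y + dy, PySem.Set.add seen (x + dx, y + dy)))
      (x, y, s)
    = ((pvEnd seq x y).1, (pvEnd seq x y).2, PySem.Set.update s (pvPath seq x y)) := by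
  induction seq with
  | nil => intro x y s; simp [pvEnd, pvPath, PySem.Set.update]
  | cons c t ih =>
      intro x y s
      rcases hd : (PySem.Dict.ofList [('>', ((1:Int), (0:Int))), ('<', (-1, 0)), ('^', (0, 1)), ('v', (0, -1))]).getD c (0, 0) with ⟨dx, dy⟩
      have hd' : pvDelta c = (dx, dy) := by rw [← pv_getD_moves, hd]
      simp only [List.foldl_cons, hd]
      rw [ih]
      simp [pvEnd, pvPath, hd', PySem.Set.update_cons]

lemma pv_visited_eq (seq : String) :
    pvVisited seq = PySem.Set.ofList (((0 : Int), (0 : Int)) :: pvPath seq.toList 0 0) := by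
  unfold pvVisited
  simp only []
  rw [pv_foldB]
  show PySem.Set.update (PySem.Set.ofList [((0:Int),(0:Int))]) (pvPath seq.toList 0 0) = _
  rw [show (((0:Int),(0:Int)) :: pvPath seq.toList 0 0) = [((0:Int),(0:Int))] ++ pvPath seq.toList 0 0 from rfl,
    PySem.Set.ofList_append]

lemma pv_step_pair (c : Char) (x y : Int) :
    (if c = '>' then (x + 1, y) else if c = '<' then (x - 1, y)
     else if c = '^' then (x, y + 1) else if c = 'v' then (x, y - 1) else (x, y))
      = (x + (pvDelta c).1, y + (pvDelta c).2) := by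
  unfold pvDelta; split_ifs <;> simp <;> ring

lemma pvEvens_cons_tail {α : Type} (b : α) (t : List α) :
    pvEvens (b :: t) = b :: pvEvens t.tail := by
  cases t <;> simp [pvEvens]

lemma pvStepA_even (x y xr yr : Int) (gs gr : List (Int × Int)) (s : Int) (a : Char)
    (h : PySem.Int.mod s 2 = 0) :
    pvStepA (x, y, xr, yr, gs, gr) (s, a)
      = (x + (pvDelta a).1, y + (pvDelta a).2, xr, yr,
         gs ++ [(x + (pvDelta a).1, y + (pvDelta a).2)], gr) := by
  simp [pvStepA, pv_step_pair, (PySem.Int.mod_eq_zero_iff_dvd s 2).mp h]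

lemma pvStepA_odd (x y xr yr : Int) (gs gr : List (Int × Int)) (s : Int) (a : Char)
    (h : PySem.Int.mod s 2 = 1) :
    pvStepA (x, y, xr, yr, gs, gr) (s, a)
      = (x, y, xr + (pvDelta a).1, yr + (pvDelta a).2, gs,
         gr ++ [(xr + (pvDelta a).1, yr + (pvDelta a).2)]) := by
  have hm : s % 2 = 1 := by rw [← PySem.Int.mod_eq_emod_of_pos (by norm_num : (0:Int) < 2)]; exact h
  simp [pvStepA, pv_step_pair, hm]

lemma pv_loopA (cs : List Char) : ∀ (s x y xr yr : Int)
    (gs gr : List (Int × Int)), PySem.Int.mod s 2 = 0 →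
    ((PySem.List.enumerate cs s).foldl pvStepA (x, y, xr, yr, gs, gr)).2.2.2.2
      = (gs ++ pvPath (pvEvens cs) x y, gr ++ pvPath (pvEvens cs.tail) xr yr) := by
  induction cs using pvEvens.induct with
  | case1 =>
      intro s x y xr yr gs gr h
      simp [PySem.List.enumerate, pvEvens, pvPath]
  | case2 a =>
      intro s x y xr yr gs gr h
      rw [PySem.List.enumerate_cons, PySem.List.enumerate_nil, List.foldl_cons, List.foldl_nil,
        pvStepA_even _ _ _ _ _ _ _ _ h]
      simp [pvEvens, pvPath]
  | case3 a b t ih =>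
      intro s x y xr yr gs gr h
      have hpos : (0:Int) < 2 := by norm_num
      have h1 : PySem.Int.mod (s + 1) 2 = 1 := by
        have h0 := h
        rw [PySem.Int.mod_eq_emod_of_pos hpos] at h0
        rw [PySem.Int.mod_eq_emod_of_pos hpos]; omega
      have h2 : PySem.Int.mod (s + 1 + 1) 2 = 0 := by
        have h0 := h
        rw [PySem.Int.mod_eq_emod_of_pos hpos] at h0
        rw [PySem.Int.mod_eq_emod_of_pos hpos]; omega
      rw [PySem.List.enumerate_cons, PySem.List.enumerate_cons, List.foldl_cons, List.foldl_cons,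
        pvStepA_even _ _ _ _ _ _ _ _ h, pvStepA_odd _ _ _ _ _ _ _ _ h1,
        ih _ _ _ _ _ _ _ h2]
      simp [pvEvens, pvEvens_cons_tail, pvPath, List.append_assoc]

lemma pv_slice_toList_even (ls : String) :
    ((PySem.Str.slice? ls none none 2).getD "").toList = pvEvens ls.toList := by
  have hm := PySem.Str.slice?_map ls none none 2
  rw [PySem.Chars.slice?_eq_listSlice?, pv_slice_even] at hm
  cases hsl : PySem.Str.slice? ls none none 2 with
  | none => rw [hsl] at hm; simp at hm
  | some w => rw [hsl] at hm; simp at hm ⊢; exact hm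

lemma pv_slice_toList_odd (ls : String) :
    ((PySem.Str.slice? ls (some 1) none 2).getD "").toList = pvEvens ls.toList.tail := by
  have hm := PySem.Str.slice?_map ls (some 1) none 2
  rw [PySem.Chars.slice?_eq_listSlice?, pv_slice_odd] at hm
  cases hsl : PySem.Str.slice? ls (some 1) none 2 with
  | none => rw [hsl] at hm; simp at hm
  | some w => rw [hsl] at hm; simp at hm ⊢; exact hm

lemma pv_main (ls : String) : get_houses ls = get_houses_alt ls := by
  have hz : PySem.Int.mod 0 2 = 0 := by decide
  have hA := pv_loopA ls.toList 0 0 0 0 0 [((0:Int),(0:Int))] [((0:Int),(0:Int))] hz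
  unfold get_houses
  simp only []
  rw [show (((PySem.List.enumerate ls.toList 0).foldl pvStepA (0, 0, 0, 0, [((0:Int),(0:Int))], [((0:Int),(0:Int))])).2.2.2.2.1)
      = [((0:Int),(0:Int))] ++ pvPath (pvEvens ls.toList) 0 0 from congrArg Prod.fst hA]
  rw [show (((PySem.List.enumerate ls.toList 0).foldl pvStepA (0, 0, 0, 0, [((0:Int),(0:Int))], [((0:Int),(0:Int))])).2.2.2.2.2)
      = [((0:Int),(0:Int))] ++ pvPath (pvEvens ls.toList.tail) 0 0 from congrArg Prod.snd hA]
  unfold get_houses_alt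
  rw [pv_visited_eq, pv_visited_eq, pv_slice_toList_even, pv_slice_toList_odd]
  rw [PySem.Set.ofList_append]
  rw [PySem.Set.ofList_ofList]
  rfl

-- ===== VERDICT (by name: the statement is the Claim_ definition above) =====
theorem get_houses_spec : Claim_equal_get_houses := by
  intro ls _
  unfold Spec_get_houses
  exact pv_main ls
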